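-- pv_equiv track=rewrite | github.com/spark159/slide-seq | check_NN.py | all_path
-- ===== SOURCE A (Python) =====
-- def rev_comp(seq):
--     rev = ""
--     for nt in seq[::-1]:
--         nt = nt.upper()
--         if nt == 'A':
--             rev += 'T'
--         elif nt == 'T':
--             rev += 'A'
--         elif nt == 'G':
--             rev += 'C'
--         elif nt == 'C':
--             rev += 'G'
--     return rev
--
-- def all_path(N, states, arrange=True):
--     temp = []
--     if N==1:
--         temp = list(states)
--     else:
--         for path in all_path(N-1, states):
--             for state in states:
--                 temp.append(path+state)
--     if not arrange:
--         return temp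
--     unique, non_pals = [], []
--     for seq in temp:
--         if rev_comp(seq) not in unique:
--             unique.append(seq)
--         else:
--             non_pals.append(seq)
--     output = unique + non_pals
--     assert len(temp) == len(output)
--     return output
-- ===== SOURCE B (Python) =====
-- # B: bottom-up iteration over length instead of recursion; rev-comp via a
-- # translation table and join; the grouping pass keeps a set of the already
-- # chosen 'unique' sequences so the inner list scan disappears.
--
-- def rev_comp(seq):
--     comp = {'A': 'T', 'T': 'A', 'G': 'C', 'C': 'G'}
--     return ''.join(comp[c] for c in reversed(seq.upper()) if c in comp)
--
-- def _arrange(paths):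
--     unique, non_pals, seen = [], [], set()
--     for seq in paths:
--         if rev_comp(seq) in seen:
--             non_pals.append(seq)
--         else:
--             unique.append(seq)
--             seen.add(seq)
--     return unique + non_pals
--
-- def all_path(N, states, arrange=True):
--     cur = list(states)
--     for _ in range(N - 1):
--         cur = [p + s for p in _arrange(cur) for s in states]
--     return _arrange(cur) if arrange else cur
-- ===== Notes on version B (the rewrite author's own statement) =====
-- stated objective: alternative
-- what changed: Replaces the recursion on N by a bottom-up loop over the length (arranging every intermediate level, as the recursion's default arrange=True does), builds rev-complements via a translation table with join instead of an if-chain with string concatenation, and keeps a set of the chosen unique sequences so the grouping pass's inner list scan disappears.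
import Mathlib
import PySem

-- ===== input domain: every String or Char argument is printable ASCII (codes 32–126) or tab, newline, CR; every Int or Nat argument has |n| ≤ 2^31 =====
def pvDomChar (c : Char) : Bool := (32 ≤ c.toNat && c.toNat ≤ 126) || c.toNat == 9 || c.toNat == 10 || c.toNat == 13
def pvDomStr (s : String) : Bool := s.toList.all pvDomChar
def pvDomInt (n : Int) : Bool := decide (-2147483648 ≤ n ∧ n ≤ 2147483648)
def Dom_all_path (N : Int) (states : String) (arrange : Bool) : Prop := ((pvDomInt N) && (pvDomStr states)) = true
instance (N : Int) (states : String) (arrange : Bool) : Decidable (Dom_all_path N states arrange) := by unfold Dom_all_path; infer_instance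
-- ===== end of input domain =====

-- B replaces A's recursion on N by a bottom-up loop over the length and keeps a set of the
-- already chosen 'unique' sequences, removing the grouping pass's inner list scan.

-- ===== PORT A =====

-- seq[::-1] is reversal (PySem.List.slice?_none_none_neg_one); nt.upper() on a single
-- character is PySem.Chars.upperChar (exact: Python str.upper maps each char separately here).
def revCompA (seq : String) : String :=
  seq.toList.reverse.foldl (fun rev nt =>
    let nt := PySem.Chars.upperChar nt
    if nt = 'A' then rev ++ "T"
    else if nt = 'T' then rev ++ "A"
    else if nt = 'G' then rev ++ "C"
    else if nt = 'C' then rev ++ "G"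
    else rev) ""

-- the unique / non_pals grouping loop of A (the 'assert' always holds: omitted)
def arrangeA (temp : List String) : List String :=
  let p := temp.foldl (fun (acc : List String × List String) seq =>
    if revCompA seq ∉ acc.1 then (acc.1 ++ [seq], acc.2) else (acc.1, acc.2 ++ [seq]))
    ([], [])
  p.1 ++ p.2

-- A's recursion, on N.toNat; for N ≤ 0 Python recurses without end (excluded by Pre_all_path)
def allPathGo (states : String) : Nat → Bool → List String
  | 0, _ => []
  | m + 1, arrange =>
    let temp :=
      if m = 0 then states.toList.map (fun c => String.ofList [c])   -- list(states)
      else (allPathGo states m true).foldl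
        (fun acc path => states.toList.foldl
          (fun acc state => acc ++ [path ++ String.ofList [state]]) acc) []
    if arrange then arrangeA temp else temp

def all_path (N : Int) (states : String) (arrange : Bool) : List String :=
  allPathGo states N.toNat arrange

-- ===== PORT B =====

def compB : PySem.Dict Char Char := PySem.Dict.mk [('A','T'),('T','A'),('G','C'),('C','G')]

-- ''.join(comp[c] for c in reversed(seq.upper()) if c in comp)
def revCompB (seq : String) : String :=
  PySem.Str.join ""
    ((((PySem.Str.upper seq).toList.reverse).filterMap (fun c => PySem.Dict.get? compB c)).map
      (fun c => String.ofList [c]))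

-- B's grouping pass: same order, membership kept in a set alongside `unique`
def arrangeB (paths : List String) : List String :=
  let t := paths.foldl (fun (acc : List String × List String × PySem.Set String) seq =>
    if revCompB seq ∈ acc.2.2 then (acc.1, acc.2.1 ++ [seq], acc.2.2)
    else (acc.1 ++ [seq], acc.2.1, PySem.Set.add acc.2.2 seq))
    ([], [], PySem.Set.empty)
  t.1 ++ t.2.1

-- bottom-up: range(N-1) iterations (range(k) has k.toNat elements)
def all_path_alt (N : Int) (states : String) (arrange : Bool) : List String :=
  let cur := (List.range (N - 1).toNat).foldl
    (fun cur _ => (arrangeB cur).flatMap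
      (fun p => states.toList.map (fun s => p ++ String.ofList [s])))
    (states.toList.map (fun c => String.ofList [c]))
  if arrange then arrangeB cur else cur

-- ===== PRECONDITION & SPEC =====
-- Python A recurses forever (RecursionError) for N ≤ 0: exactly those inputs are excluded.
def Pre_all_path (N : Int) (states : String) (arrange : Bool) : Prop := 1 ≤ N
instance (N : Int) (states : String) (arrange : Bool) : Decidable (Pre_all_path N states arrange) := by
  unfold Pre_all_path; infer_instance

def pvWitness_all_path : Int × String × Bool := (2, "AT", true)

def Spec_all_path (N : Int) (states : String) (arrange : Bool) (out : List String) : Prop := out = all_path_alt N states arrange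
instance (N : Int) (states : String) (arrange : Bool) (out : List String) : Decidable (Spec_all_path N states arrange out) := by unfold Spec_all_path; infer_instance

-- ===== CLAIM (what is proved, stated in full; the proofs are below) =====
def Claim_equal_all_path : Prop := ∀ (N : Int) (states : String) (arrange : Bool), Dom_all_path N states arrange → Pre_all_path N states arrange → Spec_all_path N states arrange (all_path N states arrange)

-- ===== LEMMAS AND PROOFS =====

theorem get?_compB (u : Char) :
    PySem.Dict.get? compB u =
      if 'A' = u then some 'T' else if 'T' = u then some 'A'
      else if 'G' = u then some 'C' else if 'C' = u then some 'G' else none := by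
  have hemp : (PySem.Dict.mk ([] : List (Char × Char))).get? u = none := by
    simp [PySem.Dict.get?]
  simp only [compB, PySem.Dict.get?_mk_cons, beq_iff_eq, hemp]

theorem get?_compB' (u : Char) :
    PySem.Dict.get? compB u =
      if u = 'A' then some 'T' else if u = 'T' then some 'A'
      else if u = 'G' then some 'C' else if u = 'C' then some 'G' else none := by
  rw [get?_compB]
  by_cases h1 : u = 'A' <;> by_cases h2 : u = 'T' <;> by_cases h3 : u = 'G' <;>
    by_cases h4 : u = 'C' <;> simp [h1, h2, h3, h4, eq_comm]

theorem toList_revCompA (seq : String) :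
    (revCompA seq).toList =
      seq.toList.reverse.filterMap (fun c => PySem.Dict.get? compB (PySem.Chars.upperChar c)) := by
  unfold revCompA
  have aux : ∀ (l : List Char) (r : String),
      (l.foldl (fun rev nt =>
        let nt := PySem.Chars.upperChar nt
        if nt = 'A' then rev ++ "T"
        else if nt = 'T' then rev ++ "A"
        else if nt = 'G' then rev ++ "C"
        else if nt = 'C' then rev ++ "G"
        else rev) r).toList
      = r.toList ++ l.filterMap (fun c => PySem.Dict.get? compB (PySem.Chars.upperChar c)) := by
    intro l
    induction l with
    | nil => intro r; simp
    | cons c l ih =>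
      intro r
      simp only [List.foldl_cons, List.filterMap_cons, ih, get?_compB']
      split_ifs <;> simp_all
  simpa using aux seq.toList.reverse ""

theorem toList_revCompB (seq : String) :
    (revCompB seq).toList =
      seq.toList.reverse.filterMap (fun c => PySem.Dict.get? compB (PySem.Chars.upperChar c)) := by
  unfold revCompB
  rw [PySem.Str.toList_join, List.map_map]
  rw [show (String.toList ∘ fun c => String.ofList [c]) = (fun c => [c]) from
    funext (fun c => by simp)]
  rw [show ("" : String).toList = [] from rfl, PySem.Chars.join_nil_singletons]
  simp [pysem, PySem.Chars.upper, List.filterMap_map, Function.comp]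

theorem revComp_eq (seq : String) : revCompA seq = revCompB seq :=
  String.toList_inj.mp (by rw [toList_revCompA, toList_revCompB])

set_option maxHeartbeats 1000000 in
theorem arrange_eq (paths : List String) : arrangeA paths = arrangeB paths := by
  have aux : ∀ (l : List String) (u np : List String) (seen : PySem.Set String),
      (∀ x, x ∈ seen ↔ x ∈ u) →
      (l.foldl (fun (acc : List String × List String) seq =>
        if revCompA seq ∉ acc.1 then (acc.1 ++ [seq], acc.2) else (acc.1, acc.2 ++ [seq])) (u, np))
      = ((l.foldl (fun (acc : List String × List String × PySem.Set String) seq =>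
          if revCompB seq ∈ acc.2.2 then (acc.1, acc.2.1 ++ [seq], acc.2.2)
          else (acc.1 ++ [seq], acc.2.1, PySem.Set.add acc.2.2 seq)) (u, np, seen)).1,
         (l.foldl (fun (acc : List String × List String × PySem.Set String) seq =>
          if revCompB seq ∈ acc.2.2 then (acc.1, acc.2.1 ++ [seq], acc.2.2)
          else (acc.1 ++ [seq], acc.2.1, PySem.Set.add acc.2.2 seq)) (u, np, seen)).2.1) := by
    intro l
    induction l with
    | nil => intro u np seen h; simp
    | cons s l ih =>
      intro u np seen h
      simp only [List.foldl_cons]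
      rw [revComp_eq s]
      by_cases hm : revCompB s ∈ seen
      · rw [if_neg (not_not_intro ((h _).mp hm)), if_pos hm]
        exact ih u (np ++ [s]) seen h
      · have hnu : revCompB s ∉ u := fun hx => hm ((h _).mpr hx)
        rw [if_pos hnu, if_neg hm]
        refine ih (u ++ [s]) np (PySem.Set.add seen s) ?_
        intro x
        rw [PySem.Set.mem_add]
        simp [h x, List.mem_append]
  simp only [arrangeA, arrangeB]
  rw [aux paths [] [] PySem.Set.empty (by intro x; simp [PySem.Set.empty])]

-- A's nested append loops build exactly B's comprehension
theorem expand_eq (states : String) (l : List String) :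
    l.foldl (fun acc path => states.toList.foldl
      (fun acc state => acc ++ [path ++ String.ofList [state]]) acc) []
    = l.flatMap (fun p => states.toList.map (fun s => p ++ String.ofList [s])) := by
  rw [PySem.List.foldl_congr_mem l _
    (fun acc path => acc ++ states.toList.map (fun s => path ++ String.ofList [s])) []
    (fun acc path _ => PySem.List.foldl_append_singleton_eq_map _ _ _)]
  simpa using PySem.List.foldl_append_eq_flatMap
    (fun p => states.toList.map (fun s => p ++ String.ofList [s])) l []

def iterB (states : String) (m : Nat) : List String :=
  (List.range m).foldl
    (fun cur _ => (arrangeB cur).flatMap (fun p => states.toList.map (fun s => p ++ String.ofList [s])))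
    (states.toList.map (fun c => String.ofList [c]))

theorem allPathGo_succ (states : String) (m : Nat) (arrange : Bool) :
    allPathGo states (m + 1) arrange =
      (let temp :=
        if m = 0 then states.toList.map (fun c => String.ofList [c])
        else (allPathGo states m true).foldl
          (fun acc path => states.toList.foldl
            (fun acc state => acc ++ [path ++ String.ofList [state]]) acc) []
      if arrange then arrangeA temp else temp) := rfl

theorem go_eq (states : String) :
    ∀ (m : Nat) (arrange : Bool),
      allPathGo states (m + 1) arrange =
        (if arrange then arrangeB (iterB states m) else iterB states m) := by
  intro m
  induction m with
  | zero =>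
    intro arrange
    cases arrange <;> simp [allPathGo_succ, iterB, arrange_eq]
  | succ m ih =>
    intro arrange
    have htemp : (allPathGo states (m + 1) true).foldl
        (fun acc path => states.toList.foldl
          (fun acc state => acc ++ [path ++ String.ofList [state]]) acc) []
        = iterB states (m + 1) := by
      rw [expand_eq, ih true, if_pos rfl]
      unfold iterB
      rw [List.range_succ, List.foldl_append]
      simp
    rw [allPathGo_succ]
    simp only [Nat.succ_ne_zero, if_false, htemp, arrange_eq]

-- ===== VERDICT (by name: the statement is the Claim_ definition above) =====
theorem all_path_spec : Claim_equal_all_path := by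
  intro N states arrange _ hpre
  unfold Spec_all_path all_path all_path_alt
  have hm : N.toNat = (N - 1).toNat + 1 := by
    unfold Pre_all_path at hpre; omega
  rw [hm, go_eq states ((N - 1).toNat) arrange]
  cases arrange <;> simp [iterB]
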